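-- pv_equiv track=rewrite | github.com/ModelBandit/GAIProject1 | Python/Scripts/DataCompare.py | erase_etc
-- ===== SOURCE A (Python) =====
-- def erase_etc(string:str):
--     string = string.replace(" ","")
--     string = string.replace(".","")
--     string = string.replace("·","")
--     string = string.replace(",","")
--     string = string.replace("(","")
--     string = string.replace(")","")
--     string = string.replace("~","")
--     string = string.replace("-","")
--
--     for i in range(10):
--         string = string.replace(f"{str(i)}","")
--
--     for i in range(65, 91):
--         string = string.replace(f"{chr(i)}","")
--
--     return string
-- ===== SOURCE B (Python) =====
-- # One filtering pass over the input instead of ~44 whole-string replace scans.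
-- REMOVE = frozenset(" .\u00b7,()~-0123456789ABCDEFGHIJKLMNOPQRSTUVWXYZ")
--
-- def erase_etc(string: str):
--     return "".join(c for c in string if c not in REMOVE)
-- ===== Notes on version B (the rewrite author's own statement) =====
-- stated objective: faster
-- what changed: Replaces the chain of ~44 whole-string str.replace passes by a single filtering pass over the input with a precomputed frozenset of the removed characters.
import Mathlib
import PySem

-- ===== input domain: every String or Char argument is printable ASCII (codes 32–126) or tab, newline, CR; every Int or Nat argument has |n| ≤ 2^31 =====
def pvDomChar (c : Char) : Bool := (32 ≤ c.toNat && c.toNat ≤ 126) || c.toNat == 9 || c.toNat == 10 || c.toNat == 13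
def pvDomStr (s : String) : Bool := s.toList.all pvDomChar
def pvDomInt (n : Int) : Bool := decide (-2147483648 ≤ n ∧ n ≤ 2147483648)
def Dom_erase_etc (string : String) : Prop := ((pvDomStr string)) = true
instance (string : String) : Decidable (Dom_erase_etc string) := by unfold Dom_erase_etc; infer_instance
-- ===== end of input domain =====

-- B replaces A's chain of ~44 whole-string replace passes by one filtering pass
-- over the input with a precomputed set of the removed characters (objective: faster).

-- ===== PORT A =====
def erase_etc (string : String) : String :=
  let s := PySem.Str.replace string " " ""
  let s := PySem.Str.replace s "." ""
  let s := PySem.Str.replace s "·" ""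
  let s := PySem.Str.replace s "," ""
  let s := PySem.Str.replace s "(" ""
  let s := PySem.Str.replace s ")" ""
  let s := PySem.Str.replace s "~" ""
  let s := PySem.Str.replace s "-" ""
  let s := (PySem.List.pyRange 0 10 1).foldl
    (fun s i => PySem.Str.replace s (PySem.Int.toStr i) "") s
  let s := (PySem.List.pyRange 65 91 1).foldl
    (fun s i => PySem.Str.replace s (String.ofList [Char.ofNat i.toNat]) "") s
  s

-- ===== PORT B =====
def pvRemove : PySem.Set Char :=
  PySem.Set.ofList " .·,()~-0123456789ABCDEFGHIJKLMNOPQRSTUVWXYZ".toList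

def erase_etc_alt (string : String) : String :=
  String.ofList (string.toList.filter (fun c => !(PySem.Set.contains pvRemove c)))

-- ===== PRECONDITION & SPEC =====
def Spec_erase_etc (string : String) (out : String) : Prop := out = erase_etc_alt string
instance (string : String) (out : String) : Decidable (Spec_erase_etc string out) := by unfold Spec_erase_etc; infer_instance

-- ===== CLAIM (what is proved, stated in full; the proofs are below) =====
def Claim_equal_erase_etc : Prop := ∀ (string : String), Dom_erase_etc string → Spec_erase_etc string (erase_etc string)

-- ===== LEMMAS AND PROOFS =====

lemma go_single (c : Char) : ∀ (l : List Char) (fuel : Nat) (acc : List Char), l.length ≤ fuel →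
    PySem.Chars.replace.go [c] [] fuel l acc = acc.reverse ++ l.filter (fun a => a != c) := by
  intro l
  induction l with
  | nil => intro fuel acc h; cases fuel <;> simp [PySem.Chars.replace.go.eq_def]
  | cons x t ih =>
    intro fuel acc h
    cases fuel with
    | zero => simp at h
    | succ f =>
      rw [PySem.Chars.replace.go.eq_def]
      by_cases hx : x = c
      · subst hx
        simp [List.isPrefixOf, ih f acc (by simpa using h)]
      · simp [List.isPrefixOf, hx, ih f (x :: acc) (by simpa using h), bne, Ne.symm hx]

lemma replace_single (c : Char) (l : List Char) :
    PySem.Chars.replace l [c] [] = l.filter (fun a => a != c) := by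
  simp [PySem.Chars.replace, go_single c l l.length [] le_rfl]

lemma strRep1 (s t : String) (c : Char) (h : t.toList = [c]) :
    PySem.Str.replace s t "" = String.ofList (s.toList.filter (fun a => a != c)) := by
  simp [PySem.Str.replace, h, replace_single]

lemma pyRange_0_10 : PySem.List.pyRange 0 10 1 = [0,1,2,3,4,5,6,7,8,9] := by decide

set_option maxRecDepth 10000 in
lemma pyRange_65_91 : PySem.List.pyRange 65 91 1 =
    [65,66,67,68,69,70,71,72,73,74,75,76,77,78,79,80,81,82,83,84,85,86,87,88,89,90] := by decide

set_option maxRecDepth 100000 in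
set_option maxHeartbeats 1000000 in
lemma pvRemove_eq : pvRemove = [' ', '.', '·', ',', '(', ')', '~', '-', '0', '1', '2', '3', '4', '5', '6', '7', '8', '9', 'A', 'B', 'C', 'D', 'E', 'F', 'G', 'H', 'I', 'J', 'K', 'L', 'M', 'N', 'O', 'P', 'Q', 'R', 'S', 'T', 'U', 'V', 'W', 'X', 'Y', 'Z'] := by decide

lemma filter_not_contains : ∀ (L : List Char) (l : List Char),
    L.foldl (fun l c => l.filter (fun a => a != c)) l = l.filter (fun a => !(L.contains a)) := by
  intro L
  induction L with
  | nil => intro l; simp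
  | cons c L ih =>
    intro l
    simp only [List.foldl]
    rw [ih, List.filter_filter]
    apply List.filter_congr
    intro a _
    by_cases h : a = c
    · subst h; simp
    · simp [h, bne]

set_option maxRecDepth 200000 in
set_option maxHeartbeats 1000000 in
theorem erase_etc_eq_alt (s : String) : erase_etc s = erase_etc_alt s := by
  simp only [erase_etc, erase_etc_alt, pyRange_0_10, pyRange_65_91, List.foldl]
  rw [strRep1 _ " " ' ' (by decide)]
  rw [strRep1 _ "." '.' (by decide)]
  rw [strRep1 _ "·" '·' (by decide)]
  rw [strRep1 _ "," ',' (by decide)]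
  rw [strRep1 _ "(" '(' (by decide)]
  rw [strRep1 _ ")" ')' (by decide)]
  rw [strRep1 _ "~" '~' (by decide)]
  rw [strRep1 _ "-" '-' (by decide)]
  rw [strRep1 _ (PySem.Int.toStr 0) '0' (by decide)]
  rw [strRep1 _ (PySem.Int.toStr 1) '1' (by decide)]
  rw [strRep1 _ (PySem.Int.toStr 2) '2' (by decide)]
  rw [strRep1 _ (PySem.Int.toStr 3) '3' (by decide)]
  rw [strRep1 _ (PySem.Int.toStr 4) '4' (by decide)]
  rw [strRep1 _ (PySem.Int.toStr 5) '5' (by decide)]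
  rw [strRep1 _ (PySem.Int.toStr 6) '6' (by decide)]
  rw [strRep1 _ (PySem.Int.toStr 7) '7' (by decide)]
  rw [strRep1 _ (PySem.Int.toStr 8) '8' (by decide)]
  rw [strRep1 _ (PySem.Int.toStr 9) '9' (by decide)]
  rw [strRep1 _ (String.ofList [Char.ofNat (Int.toNat 65)]) 'A' (by decide)]
  rw [strRep1 _ (String.ofList [Char.ofNat (Int.toNat 66)]) 'B' (by decide)]
  rw [strRep1 _ (String.ofList [Char.ofNat (Int.toNat 67)]) 'C' (by decide)]
  rw [strRep1 _ (String.ofList [Char.ofNat (Int.toNat 68)]) 'D' (by decide)]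
  rw [strRep1 _ (String.ofList [Char.ofNat (Int.toNat 69)]) 'E' (by decide)]
  rw [strRep1 _ (String.ofList [Char.ofNat (Int.toNat 70)]) 'F' (by decide)]
  rw [strRep1 _ (String.ofList [Char.ofNat (Int.toNat 71)]) 'G' (by decide)]
  rw [strRep1 _ (String.ofList [Char.ofNat (Int.toNat 72)]) 'H' (by decide)]
  rw [strRep1 _ (String.ofList [Char.ofNat (Int.toNat 73)]) 'I' (by decide)]
  rw [strRep1 _ (String.ofList [Char.ofNat (Int.toNat 74)]) 'J' (by decide)]
  rw [strRep1 _ (String.ofList [Char.ofNat (Int.toNat 75)]) 'K' (by decide)]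
  rw [strRep1 _ (String.ofList [Char.ofNat (Int.toNat 76)]) 'L' (by decide)]
  rw [strRep1 _ (String.ofList [Char.ofNat (Int.toNat 77)]) 'M' (by decide)]
  rw [strRep1 _ (String.ofList [Char.ofNat (Int.toNat 78)]) 'N' (by decide)]
  rw [strRep1 _ (String.ofList [Char.ofNat (Int.toNat 79)]) 'O' (by decide)]
  rw [strRep1 _ (String.ofList [Char.ofNat (Int.toNat 80)]) 'P' (by decide)]
  rw [strRep1 _ (String.ofList [Char.ofNat (Int.toNat 81)]) 'Q' (by decide)]
  rw [strRep1 _ (String.ofList [Char.ofNat (Int.toNat 82)]) 'R' (by decide)]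
  rw [strRep1 _ (String.ofList [Char.ofNat (Int.toNat 83)]) 'S' (by decide)]
  rw [strRep1 _ (String.ofList [Char.ofNat (Int.toNat 84)]) 'T' (by decide)]
  rw [strRep1 _ (String.ofList [Char.ofNat (Int.toNat 85)]) 'U' (by decide)]
  rw [strRep1 _ (String.ofList [Char.ofNat (Int.toNat 86)]) 'V' (by decide)]
  rw [strRep1 _ (String.ofList [Char.ofNat (Int.toNat 87)]) 'W' (by decide)]
  rw [strRep1 _ (String.ofList [Char.ofNat (Int.toNat 88)]) 'X' (by decide)]
  rw [strRep1 _ (String.ofList [Char.ofNat (Int.toNat 89)]) 'Y' (by decide)]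
  rw [strRep1 _ (String.ofList [Char.ofNat (Int.toNat 90)]) 'Z' (by decide)]
  simp only [String.toList_ofList]
  have h := filter_not_contains [' ', '.', '·', ',', '(', ')', '~', '-', '0', '1', '2', '3', '4', '5', '6', '7', '8', '9', 'A', 'B', 'C', 'D', 'E', 'F', 'G', 'H', 'I', 'J', 'K', 'L', 'M', 'N', 'O', 'P', 'Q', 'R', 'S', 'T', 'U', 'V', 'W', 'X', 'Y', 'Z'] s.toList
  simp only [List.foldl] at h
  rw [h, pvRemove_eq]
  rfl

-- ===== VERDICT (by name: the statement is the Claim_ definition above) =====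
theorem erase_etc_spec : Claim_equal_erase_etc := by
  intro s _
  unfold Spec_erase_etc
  exact erase_etc_eq_alt s
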